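-- pv_equiv track=rewrite | github.com/ronroy122/Blockchain_analysis | Eth_Bnb_Scanner.py | parse_row_selection
-- ===== SOURCE A (Python) =====
-- def parse_row_selection(selection, max_row):
--     """Converts a string like "1,3-5,8" into a list of row numbers."""
--     selected_rows = set()
--
--     if not selection or selection.strip() == "":
--         return list(range(1, max_row + 1))
--
--     for part in selection.split(','):
--         part = part.strip()
--         if '-' in part:
--             try:
--                 start, end = map(int, part.split('-'))
--                 start = max(1, start)
--                 end = min(end, max_row)
--                 selected_rows.update(range(start, end + 1))
--             except ValueError:
--                 pass
--         else:
--             try: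
--                 row_num = int(part)
--                 if 1 <= row_num <= max_row:
--                     selected_rows.add(row_num)
--             except ValueError:
--                 pass
--
--     return sorted(list(selected_rows))
-- ===== SOURCE B (Python) =====
-- def parse_row_selection(selection, max_row):
--     """Converts a string like "1,3-5,8" into a list of row numbers."""
--     if not selection or selection.strip() == "":
--         return list(range(1, max_row + 1))
--
--     intervals = []
--     for part in selection.split(','):
--         part = part.strip()
--         if '-' in part:
--             pieces = part.split('-')
--             if len(pieces) == 2:
--                 try:
--                     lo, hi = int(pieces[0]), int(pieces[1])
--                 except ValueError:
--                     continue
--                 lo = max(1, lo)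
--                 hi = min(hi, max_row)
--                 if lo <= hi:
--                     intervals.append((lo, hi))
--         else:
--             try:
--                 r = int(part)
--             except ValueError:
--                 continue
--             if 1 <= r <= max_row:
--                 intervals.append((r, r))
--
--     intervals.sort(key=lambda p: p[0])
--
--     out = []
--     i = 0
--     n = len(intervals)
--     while i < n:
--         lo, hi = intervals[i]
--         i += 1
--         while i < n and intervals[i][0] <= hi + 1:
--             hi = max(hi, intervals[i][1])
--             i += 1
--         out.extend(range(lo, hi + 1))
--     return out
-- ===== Notes on version B (the rewrite author's own statement) =====
-- stated objective: alternative
-- what changed: A expands every range into a set of individual rows and sorts the set at the end; B instead keeps each part as one clamped (lo,hi) interval, sorts the k intervals by start, and merges adjacent/overlapping intervals in a single sweep that emits the rows in ascending deduplicated order, so no per-row set and no sort of the rows is needed.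
import Mathlib
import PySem

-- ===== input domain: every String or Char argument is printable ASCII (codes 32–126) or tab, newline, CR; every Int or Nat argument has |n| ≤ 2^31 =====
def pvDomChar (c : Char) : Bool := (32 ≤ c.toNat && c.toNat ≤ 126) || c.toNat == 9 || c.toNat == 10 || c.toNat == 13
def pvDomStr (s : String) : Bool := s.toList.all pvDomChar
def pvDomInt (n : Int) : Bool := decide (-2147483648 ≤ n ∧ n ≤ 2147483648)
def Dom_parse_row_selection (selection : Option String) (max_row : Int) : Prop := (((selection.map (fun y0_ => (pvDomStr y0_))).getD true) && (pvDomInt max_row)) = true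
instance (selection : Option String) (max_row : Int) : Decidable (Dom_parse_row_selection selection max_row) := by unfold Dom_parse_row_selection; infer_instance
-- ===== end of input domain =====

-- B replaces A's set-accumulate-then-sort with clamped intervals that are sorted by their
-- start and merged into one ascending output sweep (objective: alternative; no set, no row-by-row dedup).


-- ===== PORT A =====
-- one iteration of A's loop body: strip the part, range branch ('start, end = map(int, part.split('-'))'
-- succeeds iff exactly two pieces and both int()-parse; ValueError is the fall-through) or single branch
def pvStepA (max_row : Int) (s : PySem.Set Int) (part0 : String) : PySem.Set Int :=
  if PySem.Str.isIn "-" (PySem.Str.strip part0) then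
    match (PySem.Str.split? (PySem.Str.strip part0) "-").getD [] with
    | [a, b] =>
      match PySem.Int.ofStr? a, PySem.Int.ofStr? b with
      | some st, some en =>
        -- start = max(1, start); end = min(end, max_row); selected_rows.update(range(start, end + 1))
        PySem.Set.update s (PySem.List.pyRange (max 1 st) (min en max_row + 1) 1)
      | _, _ => s
    | _ => s
  else
    match PySem.Int.ofStr? (PySem.Str.strip part0) with
    | some r => if 1 ≤ r ∧ r ≤ max_row then PySem.Set.add s r else s
    | none => s

def parse_row_selection (selection : Option String) (max_row : Int) : List Int :=
  match selection with
  | none => PySem.List.pyRange 1 (max_row + 1) 1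
  | some sel =>
    if sel = "" ∨ PySem.Str.strip sel = "" then
      PySem.List.pyRange 1 (max_row + 1) 1
    else
      PySem.List.sorted
        (((PySem.Str.split? sel ",").getD []).foldl (pvStepA max_row) PySem.Set.empty)
        (fun x => x) false

-- ===== PORT B =====
-- one iteration of B's parse loop: append the clamped, non-empty interval (lo, hi)
def pvStepB (max_row : Int) (acc : List (Int × Int)) (part0 : String) : List (Int × Int) :=
  if PySem.Str.isIn "-" (PySem.Str.strip part0) then
    match (PySem.Str.split? (PySem.Str.strip part0) "-").getD [] with
    | [a, b] =>
      match PySem.Int.ofStr? a, PySem.Int.ofStr? b with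
      | some lo, some hi =>
        if max 1 lo ≤ min hi max_row then acc ++ [(max 1 lo, min hi max_row)] else acc
      | _, _ => acc
    | _ => acc
  else
    match PySem.Int.ofStr? (PySem.Str.strip part0) with
    | some r => if 1 ≤ r ∧ r ≤ max_row then acc ++ [(r, r)] else acc
    | none => acc

-- the merge-emit sweep: B's while loop over the sorted intervals, extending the current
-- interval [lo, hi] while the next one starts at hi+1 or earlier, else emitting range(lo, hi+1)
def pvEmitGo (lo hi : Int) : List (Int × Int) → List Int
  | [] => PySem.List.pyRange lo (hi + 1) 1
  | (l2, h2) :: rest =>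
    if l2 ≤ hi + 1 then pvEmitGo lo (max hi h2) rest
    else PySem.List.pyRange lo (hi + 1) 1 ++ pvEmitGo l2 h2 rest

def pvEmit : List (Int × Int) → List Int
  | [] => []
  | (lo, hi) :: rest => pvEmitGo lo hi rest

def parse_row_selection_alt (selection : Option String) (max_row : Int) : List Int :=
  match selection with
  | none => PySem.List.pyRange 1 (max_row + 1) 1
  | some sel =>
    if sel = "" ∨ PySem.Str.strip sel = "" then
      PySem.List.pyRange 1 (max_row + 1) 1
    else
      pvEmit (PySem.List.sorted
        (((PySem.Str.split? sel ",").getD []).foldl (pvStepB max_row) [])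
        (fun p => p.1) false)

-- ===== PRECONDITION & SPEC =====
def Spec_parse_row_selection (selection : Option String) (max_row : Int) (out : List Int) : Prop := out = parse_row_selection_alt selection max_row
instance (selection : Option String) (max_row : Int) (out : List Int) : Decidable (Spec_parse_row_selection selection max_row out) := by unfold Spec_parse_row_selection; infer_instance

-- ===== CLAIM (what is proved, stated in full; the proofs are below) =====
def Claim_equal_parse_row_selection : Prop := ∀ (selection : Option String) (max_row : Int), Dom_parse_row_selection selection max_row → Spec_parse_row_selection selection max_row (parse_row_selection selection max_row)

-- ===== LEMMAS AND PROOFS =====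

-- invariant: A's set holds exactly the rows covered by B's interval list, whose
-- intervals are all non-empty and clamped into [1, max_row]
def pvInv (max_row : Int) (s : PySem.Set Int) (ivs : List (Int × Int)) : Prop :=
  (∀ r : Int, r ∈ s ↔ ∃ p ∈ ivs, p.1 ≤ r ∧ r ≤ p.2) ∧
  (∀ p ∈ ivs, 1 ≤ p.1 ∧ p.1 ≤ p.2 ∧ p.2 ≤ max_row)

theorem pvInv_step (max_row : Int) (s : PySem.Set Int) (ivs : List (Int × Int))
    (h : pvInv max_row s ivs) (part0 : String) :
    pvInv max_row (pvStepA max_row s part0) (pvStepB max_row ivs part0) := by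
  obtain ⟨hm, hg⟩ := h
  unfold pvStepA pvStepB
  by_cases hdash : PySem.Str.isIn "-" (PySem.Str.strip part0) = true
  · rw [if_pos hdash, if_pos hdash]
    rcases hsp : (PySem.Str.split? (PySem.Str.strip part0) "-").getD [] with _ | ⟨a, _ | ⟨b, _ | _⟩⟩
    · exact ⟨hm, hg⟩
    · exact ⟨hm, hg⟩
    · rcases ha : PySem.Int.ofStr? a with _ | st
      · simp only [ha]; exact ⟨hm, hg⟩
      · rcases hb : PySem.Int.ofStr? b with _ | en
        · simp only [ha, hb]; exact ⟨hm, hg⟩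
        · simp only [ha, hb]
          by_cases hcl : max 1 st ≤ min en max_row
          · rw [if_pos hcl]
            refine ⟨fun r => ?_, fun p hp => ?_⟩
            · rw [PySem.Set.mem_update, PySem.List.mem_pyRange_one, hm r]
              simp only [List.mem_append, List.mem_singleton]
              constructor
              · rintro (⟨p, hp, hl, hr⟩ | ⟨hl, hr⟩)
                · exact ⟨p, Or.inl hp, hl, hr⟩
                · exact ⟨(max 1 st, min en max_row), Or.inr rfl, by omega, by omega⟩
              · rintro ⟨p, (hp | rfl), hl, hr⟩
                · exact Or.inl ⟨p, hp, hl, hr⟩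
                · exact Or.inr ⟨by simpa using hl, by omega⟩
            · rcases List.mem_append.1 hp with hp | hp
              · exact hg p hp
              · rcases List.mem_singleton.1 hp with rfl
                refine ⟨by omega, by omega, by omega⟩
          · rw [if_neg hcl]
            refine ⟨fun r => ?_, hg⟩
            rw [PySem.Set.mem_update, PySem.List.mem_pyRange_one, hm r]
            constructor
            · rintro (⟨p, hp, hl, hr⟩ | ⟨hl, hr⟩)
              · exact ⟨p, hp, hl, hr⟩
              · omega
            · rintro ⟨p, hp, hl, hr⟩
              exact Or.inl ⟨p, hp, hl, hr⟩
    · exact ⟨hm, hg⟩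
  · rw [if_neg hdash, if_neg hdash]
    rcases hi : PySem.Int.ofStr? (PySem.Str.strip part0) with _ | rv
    · exact ⟨hm, hg⟩
    · show pvInv max_row (if 1 ≤ rv ∧ rv ≤ max_row then PySem.Set.add s rv else s)
        (if 1 ≤ rv ∧ rv ≤ max_row then ivs ++ [(rv, rv)] else ivs)
      by_cases hin : 1 ≤ rv ∧ rv ≤ max_row
      · rw [if_pos hin, if_pos hin]
        refine ⟨fun r => ?_, fun p hp => ?_⟩
        · rw [PySem.Set.mem_add, hm r]
          simp only [List.mem_append, List.mem_singleton]
          constructor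
          · rintro (⟨p, hp, hl, hr⟩ | rfl)
            · exact ⟨p, Or.inl hp, hl, hr⟩
            · exact ⟨(r, r), Or.inr rfl, le_refl r, le_refl r⟩
          · rintro ⟨p, (hp | rfl), hl, hr⟩
            · exact Or.inl ⟨p, hp, hl, hr⟩
            · exact Or.inr (by omega)
        · rcases List.mem_append.1 hp with hp | hp
          · exact hg p hp
          · rcases List.mem_singleton.1 hp with rfl
            exact ⟨hin.1, le_refl _, hin.2⟩
      · rw [if_neg hin, if_neg hin]
        exact ⟨hm, hg⟩

theorem pvInv_foldl (max_row : Int) (parts : List String) (s : PySem.Set Int)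
    (ivs : List (Int × Int)) (h : pvInv max_row s ivs) :
    pvInv max_row (parts.foldl (pvStepA max_row) s) (parts.foldl (pvStepB max_row) ivs) := by
  induction parts generalizing s ivs with
  | nil => exact h
  | cons p t ih =>
    rw [List.foldl_cons, List.foldl_cons]
    exact ih _ _ (pvInv_step _ _ _ h p)

theorem pvStepA_nodup (max_row : Int) (s : PySem.Set Int) (hs : s.Nodup) (part0 : String) :
    (pvStepA max_row s part0).Nodup := by
  unfold pvStepA
  by_cases hdash : PySem.Str.isIn "-" (PySem.Str.strip part0) = true
  · rw [if_pos hdash]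
    rcases hsp : (PySem.Str.split? (PySem.Str.strip part0) "-").getD [] with _ | ⟨a, _ | ⟨b, _ | _⟩⟩
    · exact hs
    · exact hs
    · rcases ha : PySem.Int.ofStr? a with _ | st
      · simp only [ha]; exact hs
      · rcases hb : PySem.Int.ofStr? b with _ | en
        · simp only [ha, hb]; exact hs
        · simp only [ha, hb]; exact PySem.Set.nodup_update _ _ hs
    · exact hs
  · rw [if_neg hdash]
    rcases hi : PySem.Int.ofStr? (PySem.Str.strip part0) with _ | rv
    · exact hs
    · show List.Nodup (if 1 ≤ rv ∧ rv ≤ max_row then PySem.Set.add s rv else s)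
      by_cases hin : 1 ≤ rv ∧ rv ≤ max_row
      · rw [if_pos hin]; exact PySem.Set.nodup_add _ _ hs
      · rw [if_neg hin]; exact hs

theorem pvFoldA_nodup (max_row : Int) (parts : List String) (s : PySem.Set Int) (hs : s.Nodup) :
    (parts.foldl (pvStepA max_row) s).Nodup := by
  induction parts generalizing s with
  | nil => exact hs
  | cons p t ih =>
    rw [List.foldl_cons]
    exact ih _ (pvStepA_nodup _ _ hs p)

-- the merge-emit sweep produces exactly the rows covered by [lo, hi] or the remaining
-- intervals, in strictly increasing order, all of them ≥ lo
theorem pvEmitGo_spec (L : List (Int × Int)) (lo hi : Int) (hlh : lo ≤ hi)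
    (hlo : ∀ p ∈ L, lo ≤ p.1) (hpair : L.Pairwise (fun p q => p.1 ≤ q.1))
    (hne : ∀ p ∈ L, p.1 ≤ p.2) :
    (pvEmitGo lo hi L).Pairwise (· < ·) ∧
    (∀ r : Int, r ∈ pvEmitGo lo hi L ↔ ((lo ≤ r ∧ r ≤ hi) ∨ ∃ p ∈ L, p.1 ≤ r ∧ r ≤ p.2)) ∧
    (∀ r ∈ pvEmitGo lo hi L, lo ≤ r) := by
  induction L generalizing lo hi with
  | nil =>
    refine ⟨PySem.List.pairwise_lt_pyRange_one lo (hi + 1), fun r => ?_, fun r hr => ?_⟩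
    · rw [pvEmitGo, PySem.List.mem_pyRange_one]
      constructor
      · rintro ⟨h1, h2⟩; exact Or.inl ⟨h1, by omega⟩
      · rintro (⟨h1, h2⟩ | ⟨p, hp, _⟩)
        · exact ⟨h1, by omega⟩
        · exact absurd hp (List.not_mem_nil)
    · rw [pvEmitGo, PySem.List.mem_pyRange_one] at hr; exact hr.1
  | cons q rest ih =>
    obtain ⟨l2, h2⟩ := q
    rw [pvEmitGo]
    by_cases hj : l2 ≤ hi + 1
    · rw [if_pos hj]
      have hlo2 : ∀ p ∈ rest, lo ≤ p.1 := fun p hp => hlo p (List.mem_cons_of_mem _ hp)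
      have hne2 : ∀ p ∈ rest, p.1 ≤ p.2 := fun p hp => hne p (List.mem_cons_of_mem _ hp)
      obtain ⟨c1, c2, c3⟩ := ih lo (max hi h2) (by omega) hlo2 (List.Pairwise.of_cons hpair) hne2
      have hl2h2 : l2 ≤ h2 := hne _ List.mem_cons_self
      have hlol2 : lo ≤ l2 := hlo _ List.mem_cons_self
      refine ⟨c1, fun r => ?_, c3⟩
      rw [c2 r]
      simp only [List.mem_cons]
      constructor
      · rintro (⟨h1, hmax⟩ | ⟨p, hp, hl, hr⟩)
        · rcases le_or_gt r hi with hcase | hcase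
          · exact Or.inl ⟨h1, hcase⟩
          · exact Or.inr ⟨(l2, h2), Or.inl rfl, by omega, by omega⟩
        · exact Or.inr ⟨p, Or.inr hp, hl, hr⟩
      · rintro (⟨h1, h2'⟩ | ⟨p, (rfl | hp), hl, hr⟩)
        · exact Or.inl ⟨h1, by omega⟩
        · exact Or.inl ⟨by omega, by omega⟩
        · exact Or.inr ⟨p, hp, hl, hr⟩
    · rw [if_neg hj]
      have hl2h2 : l2 ≤ h2 := hne _ List.mem_cons_self
      have hl2lo : ∀ p ∈ rest, l2 ≤ p.1 := by
        intro p hp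
        exact (List.pairwise_cons.1 hpair).1 p hp
      obtain ⟨c1, c2, c3⟩ := ih l2 h2 hl2h2 hl2lo (List.Pairwise.of_cons hpair)
        (fun p hp => hne p (List.mem_cons_of_mem _ hp))
      refine ⟨?_, fun r => ?_, fun r hr => ?_⟩
      · rw [List.pairwise_append]
        refine ⟨PySem.List.pairwise_lt_pyRange_one lo (hi + 1), c1, fun a ha b hb => ?_⟩
        rw [PySem.List.mem_pyRange_one] at ha
        have := c3 b hb
        omega
      · rw [List.mem_append, PySem.List.mem_pyRange_one, c2 r]
        simp only [List.mem_cons]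
        constructor
        · rintro (⟨h1, h2'⟩ | (⟨h1, h2'⟩ | ⟨p, hp, hl, hr⟩))
          · exact Or.inl ⟨h1, by omega⟩
          · exact Or.inr ⟨(l2, h2), Or.inl rfl, h1, h2'⟩
          · exact Or.inr ⟨p, Or.inr hp, hl, hr⟩
        · rintro (⟨h1, h2'⟩ | ⟨p, (rfl | hp), hl, hr⟩)
          · exact Or.inl ⟨h1, by omega⟩
          · exact Or.inr (Or.inl ⟨hl, hr⟩)
          · exact Or.inr (Or.inr ⟨p, hp, hl, hr⟩)
      · rcases List.mem_append.1 hr with hr | hr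
        · exact (PySem.List.mem_pyRange_one.1 hr).1
        · have := c3 r hr
          have : lo ≤ l2 := hlo _ List.mem_cons_self
          omega

theorem pvEmit_spec (L : List (Int × Int)) (hpair : L.Pairwise (fun p q => p.1 ≤ q.1))
    (hne : ∀ p ∈ L, p.1 ≤ p.2) :
    (pvEmit L).Pairwise (· < ·) ∧
    (∀ r : Int, r ∈ pvEmit L ↔ ∃ p ∈ L, p.1 ≤ r ∧ r ≤ p.2) := by
  cases L with
  | nil =>
    refine ⟨List.Pairwise.nil, fun r => ?_⟩
    simp [pvEmit]
  | cons q rest =>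
    obtain ⟨lo, hi⟩ := q
    rw [pvEmit]
    obtain ⟨c1, c2, _⟩ := pvEmitGo_spec rest lo hi (hne _ List.mem_cons_self)
      (fun p hp => (List.pairwise_cons.1 hpair).1 p hp) (List.Pairwise.of_cons hpair)
      (fun p hp => hne p (List.mem_cons_of_mem _ hp))
    refine ⟨c1, fun r => ?_⟩
    rw [c2 r]
    simp only [List.mem_cons]
    constructor
    · rintro (⟨h1, h2⟩ | ⟨p, hp, hl, hr⟩)
      · exact ⟨(lo, hi), Or.inl rfl, h1, h2⟩
      · exact ⟨p, Or.inr hp, hl, hr⟩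
    · rintro ⟨p, (rfl | hp), hl, hr⟩
      · exact Or.inl ⟨hl, hr⟩
      · exact Or.inr ⟨p, hp, hl, hr⟩

-- ===== VERDICT (by name: the statement is the Claim_ definition above) =====
theorem parse_row_selection_spec : Claim_equal_parse_row_selection := by
  intro selection max_row _
  unfold Spec_parse_row_selection parse_row_selection parse_row_selection_alt
  cases selection with
  | none => rfl
  | some sel =>
    simp only []
    by_cases hempty : sel = "" ∨ PySem.Str.strip sel = ""
    · rw [if_pos hempty, if_pos hempty]
    · rw [if_neg hempty, if_neg hempty]
      obtain ⟨hm, hg⟩ := pvInv_foldl max_row ((PySem.Str.split? sel ",").getD [])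
        PySem.Set.empty [] ⟨by intro r; simp [PySem.Set.empty], by intro p hp; simp at hp⟩
      set ivs := ((PySem.Str.split? sel ",").getD []).foldl (pvStepB max_row) [] with hivs
      have hgood : ∀ p ∈ PySem.List.sorted ivs (fun p => p.1) false, p.1 ≤ p.2 :=
        fun p hp => (hg p ((PySem.List.mem_sorted _ _ _ _).1 hp)).2.1
      obtain ⟨e1, e2⟩ := pvEmit_spec (PySem.List.sorted ivs (fun p => p.1) false)
        (PySem.List.sorted_pairwise ivs (fun p => p.1)) hgood
      apply PySem.List.sorted_eq_of_perm_of_pairwise_lt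
      · apply (List.perm_ext_iff_of_nodup e1.nodup
          (pvFoldA_nodup _ _ _ (by simp [PySem.Set.empty]))).2
        intro r
        rw [e2 r, hm r]
        constructor
        · rintro ⟨p, hp, hl, hr⟩
          exact ⟨p, (PySem.List.mem_sorted _ _ _ _).1 hp, hl, hr⟩
        · rintro ⟨p, hp, hl, hr⟩
          exact ⟨p, (PySem.List.mem_sorted _ _ _ _).2 hp, hl, hr⟩
      · exact e1
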